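-- pv_equiv track=rewrite | github.com/allenwalker1106/Albion-Bot | allenJrBot.py | getMapStatistic
-- ===== SOURCE A (Python) =====
-- COLOUM_LENGTH = 17
--
-- ITEM_PER_LINE = 4
--
-- MAX_LINE=5
--
-- def fixedWidth(string_data,fixed_length=COLOUM_LENGTH):
--     return(string_data+(fixed_length-len(string_data))*' ')
--
-- def getMapStatistic(map):
--     total_map = len(map)
--     line_count = total_map//ITEM_PER_LINE+1
--     secment_count = line_count//MAX_LINE+1
--     response = []
--     for i in range(secment_count):
--         line='>>> '
--         for j in range(i*MAX_LINE,(i+1)*MAX_LINE):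
--             for k in range(j*ITEM_PER_LINE,(j+1)*ITEM_PER_LINE):
--                 if(k<total_map):
--                     line+=f"`{fixedWidth(map[k])}`\t"
--                     if((k+1)%ITEM_PER_LINE==0):
--                         line+='\n'
--                 else:
--                     break
--         if(len(line)>6):
--             response.append(line)
--
--     return response
-- ===== SOURCE B (Python) =====
-- COLOUM_LENGTH = 17
--
-- ITEM_PER_LINE = 4
--
-- MAX_LINE = 5
--
-- def fixedWidth(string_data, fixed_length=COLOUM_LENGTH):
--     return(string_data+(fixed_length-len(string_data))*' ')
--
-- def getMapStatistic(map):
--     response = []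
--     for start in range(0, len(map), MAX_LINE * ITEM_PER_LINE):
--         segment = map[start:start + MAX_LINE * ITEM_PER_LINE]
--         text = '>>> '
--         for l in range(0, len(segment), ITEM_PER_LINE):
--             chunk = segment[l:l + ITEM_PER_LINE]
--             text += ''.join(f"`{fixedWidth(item)}`\t" for item in chunk)
--             if len(chunk) == ITEM_PER_LINE:
--                 text += '\n'
--         response.append(text)
--     return response
-- ===== Notes on version B (the rewrite author's own statement) =====
-- stated objective: simpler
-- what changed: Replaces A's arithmetic over precomputed segment/line counts with global indices, a break, and a length>6 emptiness test by direct slicing: chunk the list into 20-item segments and 4-item lines, emitting a newline exactly after full lines.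
import Mathlib
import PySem

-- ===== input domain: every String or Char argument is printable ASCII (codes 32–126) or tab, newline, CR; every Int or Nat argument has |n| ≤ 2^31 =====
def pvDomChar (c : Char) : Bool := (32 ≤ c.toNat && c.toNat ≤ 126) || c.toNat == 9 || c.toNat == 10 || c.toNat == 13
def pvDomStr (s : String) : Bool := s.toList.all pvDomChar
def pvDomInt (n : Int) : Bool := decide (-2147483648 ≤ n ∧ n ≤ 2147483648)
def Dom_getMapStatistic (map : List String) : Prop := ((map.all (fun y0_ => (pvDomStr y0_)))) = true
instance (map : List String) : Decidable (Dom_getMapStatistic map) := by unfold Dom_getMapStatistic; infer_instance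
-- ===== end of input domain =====

-- B replaces A's count arithmetic, global indices, break and length>6 test by direct
-- slicing into 20-item segments and 4-item lines (objective: simpler).


-- ===== PORT A =====
-- fixedWidth over List Char (exact for the ASCII domain); Python's negative
-- string-repetition yields '' = Nat-subtraction clamping here.
def fixedWidthA (s : List Char) : List Char := s ++ List.replicate (17 - s.length) ' '

-- the innermost 'for k in range(j*4,(j+1)*4)' with its break (abandons remaining ks)
def pvAKLoop (map : List String) (total : Int) : List Char → List Int → List Char
  | line, [] => line
  | line, k :: ks =>
    if k < total then
      let line := line ++ ['`'] ++ fixedWidthA ((PySem.List.pyGetD map k "").toList) ++ ['`', '\t']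
      let line := if PySem.Int.mod (k + 1) 4 = 0 then line ++ ['\n'] else line
      pvAKLoop map total line ks
    else line

def getMapStatistic (map : List String) : List String :=
  let total : Int := map.length
  let line_count := PySem.Int.floordiv total 4 + 1
  let secment_count := PySem.Int.floordiv line_count 5 + 1
  (PySem.List.pyRange 0 secment_count 1).foldl (fun response i =>
    let line := (PySem.List.pyRange (i * 5) ((i + 1) * 5) 1).foldl
      (fun line j => pvAKLoop map total line (PySem.List.pyRange (j * 4) ((j + 1) * 4) 1))
      ">>> ".toList
    if 6 < line.length then response ++ [String.mk line] else response) []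

-- ===== PORT B =====
def pvItem (s : String) : List Char := ['`'] ++ fixedWidthA s.toList ++ ['`', '\t']

-- the inner 'for l in range(0, len(segment), 4)' slicing loop of Source B
def pvBLines (seg : List String) : List Char :=
  if seg.isEmpty then []
  else ((seg.take 4).flatMap pvItem)
       ++ (if (seg.take 4).length = 4 then ['\n'] else [])
       ++ pvBLines (seg.drop 4)
termination_by seg.length
decreasing_by simp_all [List.isEmpty_iff]; cases seg <;> simp_all

-- the outer 'for start in range(0, len(map), 20)' slicing loop of Source B
def pvBGo (ms : List String) : List String :=
  if ms.isEmpty then []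
  else String.mk (">>> ".toList ++ pvBLines (ms.take 20)) :: pvBGo (ms.drop 20)
termination_by ms.length
decreasing_by simp_all [List.isEmpty_iff]; cases ms <;> simp_all

def getMapStatistic_alt (map : List String) : List String := pvBGo map

-- ===== PRECONDITION & SPEC =====
def Spec_getMapStatistic (map : List String) (out : List String) : Prop := out = getMapStatistic_alt map
instance (map : List String) (out : List String) : Decidable (Spec_getMapStatistic map out) := by unfold Spec_getMapStatistic; infer_instance

-- ===== CLAIM (what is proved, stated in full; the proofs are below) =====
def Claim_equal_getMapStatistic : Prop := ∀ (map : List String), Dom_getMapStatistic map → Spec_getMapStatistic map (getMapStatistic map)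

-- ===== LEMMAS AND PROOFS =====

theorem pyRange4 (a : Nat) : PySem.List.pyRange ((a : Int) * 4) (((a : Int) + 1) * 4) 1
    = [((4*a : Nat) : Int), ((4*a+1 : Nat) : Int), ((4*a+2 : Nat) : Int), ((4*a+3 : Nat) : Int)] := by
  rw [PySem.List.pyRange_one]
  have h4 : (((a : Int) + 1) * 4 - (a : Int) * 4).toNat = 4 := by omega
  rw [h4]
  simp [List.range_succ]
  omega

theorem getD_drop (map : List String) (i t : Nat) :
    map.getD (i + t) "" = ((map.drop i)[t]?).getD "" := by
  rw [List.getD_eq_getElem?_getD, List.getElem?_drop]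

theorem pyGetD_shift (map : List String) (a t : Nat) (x : String)
    (h : (map.drop (4*a))[t]? = some x) :
    PySem.List.pyGetD map (4 * (a:Int) + t) "" = x := by
  rw [show (4 * (a:Int) + t) = ((4*a+t : Nat) : Int) by push_cast; ring,
     PySem.List.pyGetD_natCast, getD_drop, h, Option.getD_some]

theorem kloop_chunk (map : List String) (a : Nat) (line : List Char) :
    pvAKLoop map map.length line (PySem.List.pyRange ((a : Int) * 4) (((a : Int) + 1) * 4) 1)
    = line ++ ((map.drop (4 * a)).take 4).flatMap pvItem
        ++ (if ((map.drop (4 * a)).take 4).length = 4 then ['\n'] else []) := by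
  rw [pyRange4]
  have hl := List.length_drop (l := map) (i := 4*a)
  have d1 : ¬ ((4:Int) ∣ 4 * (a:Int) + 1 + 1) := by omega
  have d2 : ¬ ((4:Int) ∣ 4 * (a:Int) + 2 + 1) := by omega
  have d3 : (4:Int) ∣ 4 * (a:Int) + 3 + 1 := by omega
  rcases hd : map.drop (4*a) with _ | ⟨x0, _ | ⟨x1, _ | ⟨x2, _ | ⟨x3, rest⟩⟩⟩⟩ <;>
    rw [hd] at hl <;> simp only [List.length_cons, List.length_nil] at hl
  · have c0 : ¬ (4 * (a:Int) < (map.length : Int)) := by omega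
    simp [pvAKLoop, c0]
  · have p0 : PySem.List.pyGetD map (4 * (a:Int)) "" = x0 := by
      simpa using pyGetD_shift map a 0 x0 (by rw [hd]; rfl)
    have c0 : 4 * (a:Int) < (map.length : Int) := by omega
    have c1 : ¬ (4 * (a:Int) + 1 < (map.length : Int)) := by omega
    simp [pvAKLoop, c0, c1, p0, pvItem]
  · have p0 : PySem.List.pyGetD map (4 * (a:Int)) "" = x0 := by
      simpa using pyGetD_shift map a 0 x0 (by rw [hd]; rfl)
    have p1 : PySem.List.pyGetD map (4 * (a:Int) + 1) "" = x1 := by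
      simpa using pyGetD_shift map a 1 x1 (by rw [hd]; rfl)
    have c1 : 4 * (a:Int) + 1 < (map.length : Int) := by omega
    have c2 : ¬ (4 * (a:Int) + 2 < (map.length : Int)) := by omega
    have c0 : 4 * (a:Int) < (map.length : Int) := by omega
    simp [pvAKLoop, c0, c1, c2, d1, p0, p1, pvItem]
  · have p0 : PySem.List.pyGetD map (4 * (a:Int)) "" = x0 := by
      simpa using pyGetD_shift map a 0 x0 (by rw [hd]; rfl)
    have p1 : PySem.List.pyGetD map (4 * (a:Int) + 1) "" = x1 := by
      simpa using pyGetD_shift map a 1 x1 (by rw [hd]; rfl)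
    have p2 : PySem.List.pyGetD map (4 * (a:Int) + 2) "" = x2 := by
      simpa using pyGetD_shift map a 2 x2 (by rw [hd]; rfl)
    have c0 : 4 * (a:Int) < (map.length : Int) := by omega
    have c1 : 4 * (a:Int) + 1 < (map.length : Int) := by omega
    have c2 : 4 * (a:Int) + 2 < (map.length : Int) := by omega
    have c3 : ¬ (4 * (a:Int) + 3 < (map.length : Int)) := by omega
    simp [pvAKLoop, c0, c1, c2, c3, d1, d2, p0, p1, p2, pvItem]
  · have p0 : PySem.List.pyGetD map (4 * (a:Int)) "" = x0 := by
      simpa using pyGetD_shift map a 0 x0 (by rw [hd]; rfl)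
    have p1 : PySem.List.pyGetD map (4 * (a:Int) + 1) "" = x1 := by
      simpa using pyGetD_shift map a 1 x1 (by rw [hd]; rfl)
    have p2 : PySem.List.pyGetD map (4 * (a:Int) + 2) "" = x2 := by
      simpa using pyGetD_shift map a 2 x2 (by rw [hd]; rfl)
    have p3 : PySem.List.pyGetD map (4 * (a:Int) + 3) "" = x3 := by
      simpa using pyGetD_shift map a 3 x3 (by rw [hd]; rfl)
    have c0 : 4 * (a:Int) < (map.length : Int) := by omega
    have c1 : 4 * (a:Int) + 1 < (map.length : Int) := by omega
    have c2 : 4 * (a:Int) + 2 < (map.length : Int) := by omega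
    have c3 : 4 * (a:Int) + 3 < (map.length : Int) := by omega
    simp [pvAKLoop, c0, c1, c2, c3, d1, d2, d3, p0, p1, p2, p3, pvItem]

theorem pyRange5 (i : Nat) : PySem.List.pyRange ((i : Int) * 5) (((i : Int) + 1) * 5) 1
    = [((5*i : Nat) : Int), ((5*i+1 : Nat) : Int), ((5*i+2 : Nat) : Int), ((5*i+3 : Nat) : Int), ((5*i+4 : Nat) : Int)] := by
  rw [PySem.List.pyRange_one]
  have h5 : (((i : Int) + 1) * 5 - (i : Int) * 5).toNat = 5 := by omega
  rw [h5]
  simp [List.range_succ]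
  omega

theorem pvBLines_step (seg : List String) :
    pvBLines seg = ((seg.take 4).flatMap pvItem)
      ++ ((if (seg.take 4).length = 4 then ['\n'] else []) ++ pvBLines (seg.drop 4)) := by
  by_cases h : seg.isEmpty
  · obtain rfl : seg = [] := by simpa [List.isEmpty_iff] using h
    simp [pvBLines]
  · rw [pvBLines]; simp [h]

theorem chunk_align (map : List String) (b k c : Nat) (h : k + 4 ≤ 20) (hc : c = b + k) :
    (((map.drop b).take 20).drop k).take 4 = (map.drop c).take 4 := by
  subst hc
  rw [List.drop_take, List.take_take, List.drop_drop]
  congr 1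
  omega

theorem jloop_seg (map : List String) (i : Nat) :
    (PySem.List.pyRange ((i : Int) * 5) (((i : Int) + 1) * 5) 1).foldl
      (fun line j => pvAKLoop map map.length line (PySem.List.pyRange (j * 4) ((j + 1) * 4) 1))
      ">>> ".toList
    = ">>> ".toList ++ pvBLines ((map.drop (20 * i)).take 20) := by
  rw [pyRange5]
  simp only [List.foldl_cons, List.foldl_nil]
  rw [kloop_chunk, kloop_chunk, kloop_chunk, kloop_chunk, kloop_chunk]
  have hseg0 : ((map.drop (20*i)).take 20).take 4 = (map.drop (4*(5*i))).take 4 := by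
    rw [List.take_take, show 4*(5*i) = 20*i by ring]
    congr 1
  have e1 := chunk_align map (20*i) 4  (4*(5*i+1)) (by omega) (by ring)
  have e2 := chunk_align map (20*i) 8  (4*(5*i+2)) (by omega) (by ring)
  have e3 := chunk_align map (20*i) 12 (4*(5*i+3)) (by omega) (by ring)
  have e4 := chunk_align map (20*i) 16 (4*(5*i+4)) (by omega) (by ring)
  rw [pvBLines_step, pvBLines_step, pvBLines_step, pvBLines_step, pvBLines_step]
  rw [List.drop_drop, List.drop_drop, List.drop_drop, List.drop_drop]
  norm_num
  rw [hseg0, e1, e2, e3, e4]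
  have f0 : (if 4 ≤ map.length - 4*(5*i) then ['\n'] else ([]:List Char))
      = (if 4 ≤ map.length - 20*i then ['\n'] else []) := if_congr (by omega) rfl rfl
  have f1 : (if 4 ≤ map.length - 4*(5*i+1) then ['\n'] else ([]:List Char))
      = (if 4 ≤ min 20 (map.length - 20*i) - 4 then ['\n'] else []) := if_congr (by omega) rfl rfl
  have f2 : (if 4 ≤ map.length - 4*(5*i+2) then ['\n'] else ([]:List Char))
      = (if 4 ≤ min 20 (map.length - 20*i) - 8 then ['\n'] else []) := if_congr (by omega) rfl rfl
  have f3 : (if 4 ≤ map.length - 4*(5*i+3) then ['\n'] else ([]:List Char))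
      = (if 4 ≤ min 20 (map.length - 20*i) - 12 then ['\n'] else []) := if_congr (by omega) rfl rfl
  have f4 : (if 4 ≤ map.length - 4*(5*i+4) then ['\n'] else ([]:List Char))
      = (if min 20 (map.length - 20*i) - 16 = 4 then ['\n'] else []) := if_congr (by omega) rfl rfl
  rw [f0, f1, f2, f3, f4]
  simp [pvBLines]

theorem pvBLines_len (x : String) (xs : List String) :
    3 ≤ (pvBLines (x :: xs)).length := by
  rw [pvBLines_step]
  simp [pvItem]
  omega

theorem main_loop : ∀ (n : Nat) (map acc : List String), map.length ≤ 20 * n →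
    (List.range n).foldl (fun response i =>
      if 6 < (">>> ".toList ++ pvBLines ((map.drop (20 * i)).take 20)).length
      then response ++ [String.mk (">>> ".toList ++ pvBLines ((map.drop (20 * i)).take 20))]
      else response) acc
    = acc ++ pvBGo map := by
  intro n
  induction n with
  | zero =>
    intro map acc h
    obtain rfl : map = [] := List.length_eq_zero_iff.mp (by omega)
    simp [pvBGo]
  | succ n ih =>
    intro map acc h
    rw [List.range_succ_eq_map, List.foldl_cons, List.foldl_map]
    simp only [Nat.succ_eq_add_one]
    have hbody : (fun (response : List String) (i : Nat) =>
        if 6 < (">>> ".toList ++ pvBLines ((map.drop (20 * (i+1))).take 20)).length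
        then response ++ [String.mk (">>> ".toList ++ pvBLines ((map.drop (20 * (i+1))).take 20))]
        else response)
        = (fun (response : List String) (i : Nat) =>
        if 6 < (">>> ".toList ++ pvBLines (((map.drop 20).drop (20 * i)).take 20)).length
        then response ++ [String.mk (">>> ".toList ++ pvBLines (((map.drop 20).drop (20 * i)).take 20))]
        else response) := by
      funext response i
      rw [show map.drop (20 * (i + 1)) = (map.drop 20).drop (20 * i) by
        rw [List.drop_drop]; congr 1; ring]
    rw [hbody, ih (map.drop 20) _ (by simp; omega)]
    rw [show (20:Nat) * 0 = 0 by ring, List.drop_zero]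
    cases map with
    | nil =>
      simp only [List.take_nil, List.drop_nil]
      rw [show pvBLines ([] : List String) = [] by rw [pvBLines]; rfl]
      rw [show pvBGo ([] : List String) = [] by rw [pvBGo]; rfl]
      simp
    | cons x xs =>
      have h3 : pvBLines ((x :: xs).take 20) = pvBLines (x :: xs.take 19) := by
        rw [List.take_succ_cons]
      have hlen : 6 < (">>> ".toList ++ pvBLines ((x :: xs).take 20)).length := by
        rw [h3]
        have := pvBLines_len x (xs.take 19)
        simp
        omega
      rw [if_pos hlen]
      rw [show pvBGo (x :: xs) = String.mk (">>> ".toList ++ pvBLines ((x :: xs).take 20))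
            :: pvBGo ((x :: xs).drop 20) by rw [pvBGo]; simp]
      rw [List.append_assoc, List.singleton_append]


-- ===== VERDICT (by name: the statement is the Claim_ definition above) =====
theorem getMapStatistic_spec : Claim_equal_getMapStatistic := by
  intro map _
  unfold Spec_getMapStatistic
  simp only [getMapStatistic, getMapStatistic_alt]
  have hS : PySem.Int.floordiv (PySem.Int.floordiv (map.length : Int) 4 + 1) 5 + 1
      = (((map.length / 4 + 1) / 5 + 1 : Nat) : Int) := by
    rw [PySem.Int.floordiv_eq_ediv_of_pos (by norm_num), PySem.Int.floordiv_eq_ediv_of_pos (by norm_num)]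
    omega
  rw [hS, PySem.List.pyRange_zero_nat, List.foldl_map]
  have hb : (fun (response : List String) (i : Nat) =>
      let line := (PySem.List.pyRange ((i : Int) * 5) (((i : Int) + 1) * 5) 1).foldl
        (fun line j => pvAKLoop map map.length line (PySem.List.pyRange (j * 4) ((j + 1) * 4) 1))
        ">>> ".toList
      if 6 < line.length then response ++ [String.mk line] else response)
      = (fun (response : List String) (i : Nat) =>
      if 6 < (">>> ".toList ++ pvBLines ((map.drop (20 * i)).take 20)).length
      then response ++ [String.mk (">>> ".toList ++ pvBLines ((map.drop (20 * i)).take 20))]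
      else response) := by
    funext response i
    rw [jloop_seg]
  rw [hb, main_loop _ map [] (by omega)]
  simp
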